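-- pv_equiv track=rewrite | github.com/lcouturier/PythonTraining | factorial.py | generate_factorial
-- ===== SOURCE A (Python) =====
-- import itertools as it
--
-- def generate_factorial(limit):
--     def generate():
--         x, y = (1, 1)
--         yield x
--         while True:
--             x, y = (x * y, y + 1)
--             yield x
--
--     for i in it.takewhile(lambda x: x < limit, generate()):
--         yield i
-- ===== SOURCE B (Python) =====
-- def generate_factorial(limit):
--     # Recompute each factorial from scratch: for n = 0, 1, 2, ... build
--     # n! with an explicit product over range(1, n+1), stop at the first
--     # n! that is not below the limit.
--     n = 0
--     while True:
--         f = 1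
--         for i in range(1, n + 1):
--             f *= i
--         if f >= limit:
--             return
--         yield f
--         n += 1
-- ===== Notes on version B (the rewrite author's own statement) =====
-- stated objective: alternative
-- what changed: Instead of A's incremental recurrence (running pair x,y updated each step, cut by itertools.takewhile over an infinite inner generator), B recomputes each factorial n! from scratch with an inner product loop over range(1,n+1) and stops when it reaches the limit.
import Mathlib
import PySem

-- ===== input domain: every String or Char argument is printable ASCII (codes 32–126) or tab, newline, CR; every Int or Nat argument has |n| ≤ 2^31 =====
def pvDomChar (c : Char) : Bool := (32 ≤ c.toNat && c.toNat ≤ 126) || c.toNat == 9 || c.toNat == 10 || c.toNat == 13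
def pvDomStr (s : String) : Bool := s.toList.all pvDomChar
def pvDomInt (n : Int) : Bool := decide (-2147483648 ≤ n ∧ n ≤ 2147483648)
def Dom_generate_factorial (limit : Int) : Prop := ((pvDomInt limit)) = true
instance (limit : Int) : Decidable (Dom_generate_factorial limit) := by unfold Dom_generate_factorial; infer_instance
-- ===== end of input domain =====

-- B replaces A's incremental recurrence cut by takewhile with a recompute-from-scratch
-- loop (each n! built by an inner product over range(1,n+1)); same values, more multiplications.

-- ===== PORT A =====
-- A's inner `generate()` is an infinite stream x=1,y=1; x,y = x*y,y+1.
-- We materialise its first `fuel` elements; fuel = 16 is enough on Dom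
-- (13! = 6227020800 > 2^31 ≥ limit, so takewhile always cuts before index 16).
def pvGenStream (fuel : Nat) (x y : Int) : List Int :=
  match fuel with
  | 0 => []
  | f + 1 => x :: pvGenStream f (x * y) (y + 1)

-- `for i in it.takewhile(lambda x: x < limit, generate()): yield i`
def generate_factorial (limit : Int) : List Int :=
  List.takeWhile (fun x => decide (x < limit)) (pvGenStream 16 1 1)

-- ===== PORT B =====
-- `n = 0; while True: f = 1; for i in range(1, n+1): f *= i; if f >= limit: return; yield f; n += 1`
-- (fuel 16 is a totality device only; the loop exits by its own test on Dom).
def pvBLoop (limit : Int) (fuel n : Nat) : List Int :=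
  match fuel with
  | 0 => []
  | fl + 1 =>
      let f := (PySem.List.pyRange 1 ((n : Int) + 1) 1).foldl (· * ·) 1
      if f ≥ limit then [] else f :: pvBLoop limit fl (n + 1)

def generate_factorial_alt (limit : Int) : List Int :=
  pvBLoop limit 16 0

-- ===== PRECONDITION & SPEC =====
def Spec_generate_factorial (limit : Int) (out : List Int) : Prop := out = generate_factorial_alt limit
instance (limit : Int) (out : List Int) : Decidable (Spec_generate_factorial limit out) := by unfold Spec_generate_factorial; infer_instance

-- ===== CLAIM (what is proved, stated in full; the proofs are below) =====
def Claim_equal_generate_factorial : Prop := ∀ (limit : Int), Dom_generate_factorial limit → Spec_generate_factorial limit (generate_factorial limit)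

-- ===== LEMMAS AND PROOFS =====
-- B's inner product over range(1, n+1), i.e. n!.
def pvProd (n : Nat) : Int := (PySem.List.pyRange 1 ((n : Int) + 1) 1).foldl (· * ·) 1

theorem pvProd_succ (n : Nat) : pvProd (n + 1) = pvProd n * ((n : Int) + 1) := by
  unfold pvProd
  rw [show ((n + 1 : Nat) : Int) + 1 = ((n : Int) + 1) + 1 by push_cast; ring,
      PySem.List.pyRange_one_succ_right (by omega : (1 : Int) ≤ (n : Int) + 1)]
  simp

-- takewhile over A's materialised stream, entered with state (n!, n+1),
-- is exactly B's recompute loop entered at n.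
theorem pv_main (limit : Int) (fuel n : Nat) :
    List.takeWhile (fun a => decide (a < limit)) (pvGenStream fuel (pvProd n) ((n : Int) + 1))
      = pvBLoop limit fuel n := by
  induction fuel generalizing n with
  | zero => rfl
  | succ fl ih =>
      have hB : pvBLoop limit (fl + 1) n
          = if pvProd n ≥ limit then [] else pvProd n :: pvBLoop limit fl (n + 1) := rfl
      rw [hB]
      simp only [pvGenStream, List.takeWhile_cons]
      by_cases h : pvProd n < limit
      · rw [show pvProd n * ((n : Int) + 1) = pvProd (n + 1) from (pvProd_succ n).symm,
            show ((n : Int) + 1) + 1 = ((n + 1 : Nat) : Int) + 1 by push_cast; ring,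
            ih (n + 1)]
        simp [h, show ¬ pvProd n ≥ limit by omega]
      · simp [h, show pvProd n ≥ limit by omega]

-- ===== VERDICT (by name: the statement is the Claim_ definition above) =====
theorem generate_factorial_spec : Claim_equal_generate_factorial := by
  intro limit _
  unfold Spec_generate_factorial generate_factorial generate_factorial_alt
  have h0 : pvProd 0 = 1 := by decide
  have := pv_main limit 16 0
  simpa [h0, pvProd] using this
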